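-- pv_equiv track=rewrite | github.com/auto-pts/auto-pts | autopts/bot/common.py | sort_and_reduce_prefixes
-- ===== SOURCE A (Python) =====
-- def sort_and_reduce_prefixes(prefixes):
--     sorted_prefixes = sorted(prefixes, key=len)
--     final_prefixes = []
--
--     for s in sorted_prefixes:
--         duplicated = False
--
--         for f in final_prefixes:
--             if s.startswith(f):
--                 duplicated = True
--                 break
--
--         if not duplicated:
--             final_prefixes.append(s)
--
--     return final_prefixes
-- ===== SOURCE B (Python) =====
-- def sort_and_reduce_prefixes(prefixes):
--     kept = set()
--     result = []
--     for s in sorted(prefixes, key=len):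
--         if not any(s[:i] in kept for i in range(len(s) + 1)):
--             kept.add(s)
--             result.append(s)
--     return result
-- ===== Notes on version B (the rewrite author's own statement) =====
-- stated objective: alternative
-- what changed: B replaces A's inner scan over the kept list (a startswith test per kept string) with a hash-set of kept strings queried once per prefix of the current string, so the per-string cost depends on the string's length instead of the number of kept strings.
import Mathlib
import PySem

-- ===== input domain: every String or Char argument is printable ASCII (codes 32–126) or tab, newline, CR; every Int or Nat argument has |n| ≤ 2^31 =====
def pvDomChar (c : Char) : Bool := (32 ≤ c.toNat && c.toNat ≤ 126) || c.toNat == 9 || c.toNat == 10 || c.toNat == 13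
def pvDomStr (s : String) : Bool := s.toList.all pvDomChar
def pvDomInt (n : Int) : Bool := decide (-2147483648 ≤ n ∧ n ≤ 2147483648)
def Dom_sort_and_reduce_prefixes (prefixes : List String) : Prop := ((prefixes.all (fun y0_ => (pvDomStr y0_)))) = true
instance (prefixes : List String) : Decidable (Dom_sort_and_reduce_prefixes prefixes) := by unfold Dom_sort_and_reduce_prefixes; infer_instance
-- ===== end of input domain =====

-- B replaces A's inner scan over the kept list with a hash-set membership test per prefix of the
-- current string (an alternative algorithm; cost per string depends on its length, not on the
-- number of kept strings). Return values proved equal.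

-- ===== PORT A =====
-- for s in sorted(prefixes, key=len): if no f in final_prefixes has s.startswith(f), append s
def sort_and_reduce_prefixes (prefixes : List String) : List String :=
  (PySem.List.sorted prefixes (fun s => PySem.Str.len s) false).foldl
    (fun final s =>
      if final.any (fun f => PySem.Str.startswith s f) then final else final ++ [s]) []

-- ===== PORT B =====
-- one loop step of Source B: test every prefix s[:i], i = 0..len(s), against the kept set
def pvAltStep (st : PySem.Set String × List String) (s : String) :
    PySem.Set String × List String :=
  if (PySem.List.pyRange 0 ((PySem.Str.len s : Int) + 1) 1).any
       (fun i => PySem.Set.contains st.1 (PySem.Str.slice s none (some i)))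
  then st
  else (PySem.Set.add st.1 s, st.2 ++ [s])

def sort_and_reduce_prefixes_alt (prefixes : List String) : List String :=
  ((PySem.List.sorted prefixes (fun s => PySem.Str.len s) false).foldl
    pvAltStep (PySem.Set.empty, [])).2

-- ===== PRECONDITION & SPEC =====
def Spec_sort_and_reduce_prefixes (prefixes : List String) (out : List String) : Prop := out = sort_and_reduce_prefixes_alt prefixes
instance (prefixes : List String) (out : List String) : Decidable (Spec_sort_and_reduce_prefixes prefixes out) := by unfold Spec_sort_and_reduce_prefixes; infer_instance

-- ===== CLAIM (what is proved, stated in full; the proofs are below) =====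
def Claim_equal_sort_and_reduce_prefixes : Prop := ∀ (prefixes : List String), Dom_sort_and_reduce_prefixes prefixes → Spec_sort_and_reduce_prefixes prefixes (sort_and_reduce_prefixes prefixes)

-- ===== LEMMAS AND PROOFS =====

-- the two loop tests agree when the kept set has the same members as the kept list
theorem pvCond_eq (s : String) (kept : PySem.Set String) (acc : List String)
    (h : ∀ x, x ∈ kept ↔ x ∈ acc) :
    (PySem.List.pyRange 0 ((PySem.Str.len s : Int) + 1) 1).any
      (fun i => PySem.Set.contains kept (PySem.Str.slice s none (some i)))
    = acc.any (fun f => PySem.Str.startswith s f) := by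
  rw [Bool.eq_iff_iff]
  simp only [List.any_eq_true, PySem.List.mem_pyRange_one, PySem.Set.contains_iff]
  constructor
  · rintro ⟨i, ⟨h0, hi⟩, hm⟩
    refine ⟨_, (h _).mp hm, ?_⟩
    have hsl : (PySem.Str.slice s none (some i)).toList = s.toList.take i.toNat := by
      simp [PySem.List.slice_to _ h0]
    rw [PySem.Str.startswith_eq, PySem.Chars.startswith_iff, hsl]
    exact List.take_prefix _ _
  · rintro ⟨f, hf, hsw⟩
    rw [PySem.Str.startswith_eq, PySem.Chars.startswith_iff] at hsw
    refine ⟨(f.toList.length : Int), ⟨by positivity, ?_⟩, ?_⟩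
    · have := hsw.length_le
      rw [PySem.Str.len_eq]
      omega
    · have hfl : PySem.Str.slice s none (some (f.toList.length : Int)) = f := by
        have hl : (PySem.Str.slice s none (some (f.toList.length : Int))).toList = f.toList := by
          obtain ⟨t, ht⟩ := hsw
          simp [PySem.List.slice_to_natCast, ← ht]
        exact String.toList_inj.mp hl
      rw [hfl]
      exact (h f).mpr hf

theorem pvLoop_eq (l : List String) (kept : PySem.Set String) (acc : List String)
    (h : ∀ x, x ∈ kept ↔ x ∈ acc) :
    l.foldl (fun final s =>
      if final.any (fun f => PySem.Str.startswith s f) then final else final ++ [s]) acc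
    = (l.foldl pvAltStep (kept, acc)).2 := by
  induction l generalizing kept acc with
  | nil => simp
  | cons s t ih =>
    simp only [List.foldl_cons, pvAltStep]
    rw [pvCond_eq s kept acc h]
    by_cases hc : acc.any (fun f => PySem.Str.startswith s f) = true
    · simp only [hc, if_true]
      exact ih kept acc h
    · simp only [Bool.not_eq_true] at hc
      simp only [hc, Bool.false_eq_true, if_false]
      refine ih _ _ ?_
      intro x
      have hs : s ∉ kept := by
        intro hx
        have hss : PySem.Str.startswith s s = true := by
          rw [PySem.Str.startswith_eq, PySem.Chars.startswith_iff]
        have := List.any_eq_true.mpr ⟨s, (h s).mp hx, hss⟩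
        rw [hc] at this
        exact Bool.noConfusion this
      rw [PySem.Set.add_of_not_mem hs]
      simp [h x, or_comm]

-- ===== VERDICT (by name: the statement is the Claim_ definition above) =====
theorem sort_and_reduce_prefixes_spec : Claim_equal_sort_and_reduce_prefixes := by
  intro prefixes _
  unfold Spec_sort_and_reduce_prefixes sort_and_reduce_prefixes sort_and_reduce_prefixes_alt
  exact pvLoop_eq _ PySem.Set.empty [] (by simp [PySem.Set.empty])
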